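-- pv_equiv track=rewrite | github.com/apple/ml-lucid-datagen | lucid_generate_data/generate_str_slot_values.py | check_str_responses_said_by_user
-- ===== SOURCE A (Python) =====
-- def check_str_responses_said_by_user(with_slots: str, user_string: str):
--     in_slot_value = False
--     slot_value = ""
--     all_slots = []
--     for char in with_slots:
--         if char == '"':
--             in_slot_value = not in_slot_value
--             if not in_slot_value:
--                 all_slots.append(slot_value)
--                 slot_value = ""
--         if in_slot_value:
--             if char != '"':
--                 slot_value += char
--
--     all_slots = [y for x in all_slots for y in x.split("|")]
--
--     for value in all_slots:
--         if value not in user_string: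
--             return False, "Slot: " + value + " is not in: " + user_string
--
--     return True, None
-- ===== SOURCE B (Python) =====
-- def check_str_responses_said_by_user(with_slots: str, user_string: str):
--     parts = with_slots.split('"')
--     # contents of complete quote pairs: odd-index segments, excluding a trailing unclosed one
--     for slot in parts[1:-1:2]:
--         for value in slot.split("|"):
--             if value not in user_string:
--                 return False, "Slot: " + value + " is not in: " + user_string
--     return True, None
-- ===== Notes on version B (the rewrite author's own statement) =====
-- stated objective: idiomatic
-- what changed: Replaces the character-by-character quote-toggling state machine (with explicit in_slot_value/slot_value accumulators) by str.split('"') with the stride slice [1:-1:2], which yields the contents of every complete quote pair directly; the substring check then runs as a nested loop over each segment's '|'-parts.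
import Mathlib
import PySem

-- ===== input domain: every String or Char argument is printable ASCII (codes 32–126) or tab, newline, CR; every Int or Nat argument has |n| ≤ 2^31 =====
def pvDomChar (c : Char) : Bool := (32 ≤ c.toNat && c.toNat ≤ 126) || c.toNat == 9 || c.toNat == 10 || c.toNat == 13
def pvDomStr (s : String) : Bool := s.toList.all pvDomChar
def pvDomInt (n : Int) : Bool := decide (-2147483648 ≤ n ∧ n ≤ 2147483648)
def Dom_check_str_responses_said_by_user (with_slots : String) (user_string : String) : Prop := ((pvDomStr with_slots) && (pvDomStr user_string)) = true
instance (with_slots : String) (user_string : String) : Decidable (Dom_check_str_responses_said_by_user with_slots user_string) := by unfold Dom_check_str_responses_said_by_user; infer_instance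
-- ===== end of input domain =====

-- B replaces A's character-by-character quote-toggling state machine by split('"') with the
-- stride slice [1:-1:2] (the contents of every complete quote pair); objective: idiomatic.

-- "Slot: " + value + " is not in: " + user_string   (shared message builder, used by both ports)
def pvMsg (v : List Char) (u : List Char) : String :=
  String.ofList ("Slot: ".toList ++ v ++ " is not in: ".toList ++ u)

-- ===== PORT A =====
-- loop body of 'for char in with_slots', state (in_slot_value, slot_value, all_slots)
def pvStep (s : Bool × List Char × List (List Char)) (c : Char) : Bool × List Char × List (List Char) :=
  let s1 :=
    if c = '"' then
      let inS := !s.1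
      if inS = false then (inS, ([] : List Char), s.2.2 ++ [s.2.1])
      else (inS, s.2.1, s.2.2)
    else s
  if s1.1 && !(c = '"') then (s1.1, s1.2.1 ++ [c], s1.2.2) else s1

-- 'for value in all_slots: if value not in user_string: return False, …' / final 'return True, None'
def pvCheckAll (u : List Char) : List (List Char) → Bool × Option String
  | [] => (true, none)
  | v :: rest =>
      if PySem.Chars.isIn v u = false then (false, some (pvMsg v u))
      else pvCheckAll u rest

def check_str_responses_said_by_user (with_slots : String) (user_string : String) : Bool × Option String :=
  let st := with_slots.toList.foldl pvStep (false, [], [])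
  -- all_slots = [y for x in all_slots for y in x.split("|")]
  let all_slots := st.2.2.flatMap (fun x => PySem.Chars.splitOn x ['|'])
  pvCheckAll user_string.toList all_slots

-- ===== PORT B =====
-- inner 'for value in slot.split("|")': first value not in user_string
def pvFirstMissing (u : List Char) : List (List Char) → Option (List Char)
  | [] => none
  | v :: rest => if PySem.Chars.isIn v u then pvFirstMissing u rest else some v

-- outer 'for slot in parts[1:-1:2]'
def pvAltOuter (u : List Char) : List (List Char) → Bool × Option String
  | [] => (true, none)
  | slot :: rest =>
      match pvFirstMissing u (PySem.Chars.splitOn slot ['|']) with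
      | some v => (false, some (pvMsg v u))
      | none => pvAltOuter u rest

def check_str_responses_said_by_user_alt (with_slots : String) (user_string : String) : Bool × Option String :=
  let parts := PySem.Chars.splitOn with_slots.toList ['"']
  -- parts[1:-1:2]; step 2 ≠ 0, so slice? is always 'some'
  let slots := (PySem.List.slice? parts (some 1) (some (-1)) 2).getD []
  pvAltOuter user_string.toList slots

-- ===== PRECONDITION & SPEC =====
def Spec_check_str_responses_said_by_user (with_slots : String) (user_string : String) (out : Bool × Option String) : Prop := out = check_str_responses_said_by_user_alt with_slots user_string
instance (with_slots : String) (user_string : String) (out : Bool × Option String) : Decidable (Spec_check_str_responses_said_by_user with_slots user_string out) := by unfold Spec_check_str_responses_said_by_user; infer_instance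

-- ===== CLAIM (what is proved, stated in full; the proofs are below) =====
def Claim_equal_check_str_responses_said_by_user : Prop := ∀ (with_slots : String) (user_string : String), Dom_check_str_responses_said_by_user with_slots user_string → Spec_check_str_responses_said_by_user with_slots user_string (check_str_responses_said_by_user with_slots user_string)

-- ===== LEMMAS AND PROOFS =====

-- structural version of split on a single-character separator
def pvSplit (d : Char) : List Char → List (List Char)
  | [] => [[]]
  | c :: cs =>
      if c = d then [] :: pvSplit d cs
      else match pvSplit d cs with
        | [] => [[c]]
        | h :: t => (c :: h) :: t

def pvModHeadL (pre : List Char) : List (List Char) → List (List Char)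
  | [] => [pre]
  | h :: t => (pre ++ h) :: t

theorem pvSplit_ne_nil (d : Char) (l : List Char) : pvSplit d l ≠ [] := by
  cases l with
  | nil => simp [pvSplit]
  | cons c cs =>
      simp only [pvSplit]
      split
      · simp
      · split <;> simp

theorem pvSplitOn_go_eq (d : Char) :
    ∀ (fuel : Nat) (l cur : List Char) (acc : List (List Char)), l.length < fuel →
      PySem.Chars.splitOn.go [d] fuel l cur acc
        = acc.reverse ++ pvModHeadL cur.reverse (pvSplit d l) := by
  intro fuel
  induction fuel with
  | zero => intro l cur acc h; omega
  | succ f ih =>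
      intro l cur acc h
      cases l with
      | nil =>
          simp [PySem.Chars.splitOn.go, pvSplit, pvModHeadL]
      | cons c rest =>
          by_cases hc : c = d
          · subst hc
            have hpre : List.isPrefixOf [c] (c :: rest) = true := by
              simp [List.isPrefixOf]
            rw [PySem.Chars.splitOn.go]
            simp only [hpre, if_pos]
            have hdrop : List.drop [c].length (c :: rest) = rest := by simp
            rw [hdrop, ih rest [] (cur.reverse :: acc) (by simpa using Nat.lt_of_succ_lt_succ h)]
            rcases hsp : pvSplit c rest with _ | ⟨h0, t0⟩
            · exact absurd hsp (pvSplit_ne_nil c rest)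
            · simp [pvSplit, pvModHeadL, hsp]
          · have hpre : List.isPrefixOf [d] (c :: rest) = false := by
              simp [List.isPrefixOf]
              exact fun hdc => absurd hdc.symm hc
            rw [PySem.Chars.splitOn.go]
            simp only [hpre, Bool.false_eq_true, if_false]
            rw [ih rest (c :: cur) acc (by simpa using Nat.lt_of_succ_lt_succ h)]
            rcases hsp : pvSplit d rest with _ | ⟨h0, t0⟩
            · exact absurd hsp (pvSplit_ne_nil d rest)
            · simp [pvSplit, hc, pvModHeadL, hsp]

theorem pvSplitOn_eq (d : Char) (l : List Char) :
    PySem.Chars.splitOn l [d] = pvSplit d l := by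
  have hgo := pvSplitOn_go_eq d (l.length + 1) l [] [] (by omega)
  rcases hsp : pvSplit d l with _ | ⟨h0, t0⟩
  · exact absurd hsp (pvSplit_ne_nil d l)
  · simpa [PySem.Chars.splitOn, pvModHeadL, hsp] using hgo

-- the elements paired off two at a time (first of each complete pair)
def pvPairs {α : Type} : List α → List α
  | [] => []
  | [_] => []
  | a :: _ :: r => a :: pvPairs r

-- the slots collected by A's state machine, expressed on the split segments
def pvCollect : Bool → List Char → List (List Char) → List (List Char)
  | _, _, [] => []
  | false, _, _ :: rest => pvCollect true [] rest
  | true, _, [_] => []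
  | true, cur, s :: rest => (cur ++ s) :: pvCollect false [] rest

theorem pvCollect_true_eq (t : List (List Char)) :
    pvCollect true [] t = pvPairs t := by
  induction t using pvPairs.induct with
  | case1 => simp [pvCollect, pvPairs]
  | case2 a => simp [pvCollect, pvPairs]
  | case3 a b r ih =>
      cases r with
      | nil => simp [pvCollect, pvPairs]
      | cons c r' => simp [pvCollect, pvPairs, ih]

theorem pvStep_quote_false (all : List (List Char)) :
    pvStep (false, [], all) '"' = (true, [], all) := by simp [pvStep]

theorem pvStep_quote_true (cur : List Char) (all : List (List Char)) :
    pvStep (true, cur, all) '"' = (false, [], all ++ [cur]) := by simp [pvStep]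

theorem pvStep_other_false {c : Char} (hc : c ≠ '"') (cur : List Char) (all : List (List Char)) :
    pvStep (false, cur, all) c = (false, cur, all) := by simp [pvStep, hc]

theorem pvStep_other_true {c : Char} (hc : c ≠ '"') (cur : List Char) (all : List (List Char)) :
    pvStep (true, cur, all) c = (true, cur ++ [c], all) := by simp [pvStep, hc]

theorem pvFold_slots (cs : List Char) :
    ∀ (inSlot : Bool) (cur : List Char) (all : List (List Char)),
      (inSlot = false → cur = []) →
      (cs.foldl pvStep (inSlot, cur, all)).2.2
      = all ++ (if inSlot then pvCollect true cur (pvSplit '"' cs)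
                else pvCollect false [] (pvSplit '"' cs)) := by
  induction cs with
  | nil =>
      intro inSlot cur all h
      cases inSlot <;> simp [pvSplit, pvCollect]
  | cons c cs ih =>
      intro inSlot cur all h
      rw [List.foldl_cons]
      by_cases hc : c = '"'
      · subst hc
        cases inSlot with
        | false =>
            have hcur : cur = [] := h rfl
            subst hcur
            rw [pvStep_quote_false, ih true [] all (by simp)]
            simp [pvSplit, pvCollect]
        | true =>
            rw [pvStep_quote_true, ih false [] (all ++ [cur]) (fun _ => rfl)]
            rcases hsp : pvSplit '"' cs with _ | ⟨h0, t0⟩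
            · exact absurd hsp (pvSplit_ne_nil '"' cs)
            · simp [pvSplit, hsp, pvCollect]
      · cases inSlot with
        | false =>
            have hcur : cur = [] := h rfl
            subst hcur
            rw [pvStep_other_false hc, ih false [] all (fun _ => rfl)]
            rcases hsp : pvSplit '"' cs with _ | ⟨h0, t0⟩
            · exact absurd hsp (pvSplit_ne_nil '"' cs)
            · simp [pvSplit, hc, hsp, pvCollect]
        | true =>
            rw [pvStep_other_true hc, ih true (cur ++ [c]) all (by simp)]
            rcases hsp : pvSplit '"' cs with _ | ⟨h0, t0⟩
            · exact absurd hsp (pvSplit_ne_nil '"' cs)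
            · cases t0 with
              | nil => simp [pvSplit, hc, hsp, pvCollect]
              | cons x t0' => simp [pvSplit, hc, hsp, pvCollect]

theorem pvFilterMap_eq {α : Type} (l : List α) :
    List.filterMap (fun k => l[1+2*k]?) (List.range ((l.length-1)/2)) = pvPairs l.tail := by
  induction l using pvPairs.induct with
  | case1 => simp [pvPairs]
  | case2 a => simp [pvPairs]
  | case3 a b r ih =>
      cases r with
      | nil => simp [pvPairs]
      | cons c r' =>
          have hcount : ((a :: b :: c :: r').length - 1)/2 = ((c :: r').length - 1)/2 + 1 := by
            simp only [List.length_cons]; omega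
          rw [hcount, List.range_succ_eq_map, List.filterMap_cons]
          have hf0 : (a :: b :: c :: r' : List α)[1+2*0]? = some b := by simp
          rw [hf0]
          simp only [List.filterMap_map, Function.comp]
          have hfm : List.filterMap (fun k => (a :: b :: c :: r' : List α)[1+2*(Nat.succ k)]?)
                    (List.range (((c :: r').length - 1)/2))
               = List.filterMap (fun k => (c :: r' : List α)[1+2*k]?)
                    (List.range (((c :: r').length - 1)/2)) := by
            apply List.filterMap_congr
            intro k _
            have h3 : 1+2*(Nat.succ k) = (1+2*k)+1+1 := by omega
            rw [h3, List.getElem?_cons_succ, List.getElem?_cons_succ]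
          rw [hfm, ih]
          simp [pvPairs]

theorem pvSlice_reduce {α : Type} (l : List α) :
    PySem.List.slice? l (some 1) (some (-1)) 2
      = some (List.filterMap (fun k => l[1+2*k]?) (List.range ((l.length-1)/2))) := by
  simp only [PySem.List.slice?, PySem.List.sliceIndices]
  norm_num
  congr 1
  · -- the index functions agree
    funext x
    rcases l with _ | ⟨a, t⟩
    · simp
    · rcases t with _ | ⟨b, t'⟩
      · have h1 : (min (1:Int) (↑([a] : List α).length) + 2*(x:Int)).toNat = 1+2*x := by
          simp only [List.length_cons, List.length_nil]; omega
        rw [h1]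
      · simp only [List.length_cons]
        congr 1
        omega
  · -- the counts agree
    congr 1
    rcases l with _ | ⟨a, t⟩
    · norm_num
    · rcases t with _ | ⟨b, t'⟩
      · norm_num
      · simp only [List.length_cons]
        split_ifs with hlt <;> omega

theorem pvSlice_eq (l : List (List Char)) :
    (PySem.List.slice? l (some 1) (some (-1)) 2).getD [] = pvPairs l.tail := by
  rw [pvSlice_reduce, Option.getD_some, pvFilterMap_eq]

-- single flat loop over flatMap = nested loops
theorem pvCheckAll_append (u : List Char) (xs ys : List (List Char)) :
    pvCheckAll u (xs ++ ys)
      = match pvFirstMissing u xs with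
        | some v => (false, some (pvMsg v u))
        | none => pvCheckAll u ys := by
  induction xs with
  | nil => simp [pvFirstMissing]
  | cons v rest ih =>
      simp only [List.cons_append, pvCheckAll, pvFirstMissing]
      by_cases hv : PySem.Chars.isIn v u
      · simpa [hv] using ih
      · simp [hv]

theorem pvCheckAll_flatMap (u : List Char) (slots : List (List Char)) :
    pvCheckAll u (slots.flatMap (fun x => PySem.Chars.splitOn x ['|']))
      = pvAltOuter u slots := by
  induction slots with
  | nil => simp [pvCheckAll, pvAltOuter]
  | cons s rest ih =>
      rw [List.flatMap_cons, pvCheckAll_append]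
      simp only [pvAltOuter]
      cases pvFirstMissing u (PySem.Chars.splitOn s ['|']) <;> simp [ih]

-- ===== VERDICT (by name: the statement is the Claim_ definition above) =====
theorem check_str_responses_said_by_user_spec : Claim_equal_check_str_responses_said_by_user := by
  intro ws us _
  unfold Spec_check_str_responses_said_by_user
  show pvCheckAll us.toList
        (((ws.toList.foldl pvStep (false, [], [])).2.2).flatMap
          (fun x => PySem.Chars.splitOn x ['|']))
      = pvAltOuter us.toList
          ((PySem.List.slice? (PySem.Chars.splitOn ws.toList ['"']) (some 1) (some (-1)) 2).getD [])
  rw [pvFold_slots ws.toList false [] [] (fun _ => rfl)]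
  rw [pvSlice_eq, pvSplitOn_eq]
  simp only [List.nil_append, if_neg (Bool.false_ne_true)]
  rw [pvCheckAll_flatMap]
  congr 1
  cases hsp : pvSplit '"' ws.toList with
  | nil => exact absurd hsp (pvSplit_ne_nil '"' ws.toList)
  | cons s0 rest => simp [pvCollect, pvCollect_true_eq]
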